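-- pv_equiv track=rewrite | github.com/frauke227/E2E_CodingChallenges | Challenge7/uncensor.py | uncensor
-- ===== SOURCE A (Python) =====
-- def uncensor(string, vowels):
--     """Given a censored string and a string of the censored vowels, return the original uncensored string.
--
--     Args:
--         string ([string]): [censored string]
--         vowels ([string]): [(censored) vowels]
--     """
--     original_string=""
--     vowels_index = 0
--     for i in range(len(string)):
--         if string[i] == "*":
--             original_string += vowels[vowels_index]
--             vowels_index += 1
--         else:
--             original_string += string[i]
--     return original_string
-- ===== SOURCE B (Python) =====
-- def uncensor(string, vowels):
--     parts = string.split('*')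
--     result = parts[0]
--     for i, seg in enumerate(parts[1:]):
--         result = result + vowels[i] + seg
--     return result
-- ===== Notes on version B (the rewrite author's own statement) =====
-- stated objective: idiomatic
-- what changed: Instead of scanning character by character with a running vowel index, B splits the string on '*' once and interleaves the vowels between the resulting segments with enumerate.
import Mathlib
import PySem

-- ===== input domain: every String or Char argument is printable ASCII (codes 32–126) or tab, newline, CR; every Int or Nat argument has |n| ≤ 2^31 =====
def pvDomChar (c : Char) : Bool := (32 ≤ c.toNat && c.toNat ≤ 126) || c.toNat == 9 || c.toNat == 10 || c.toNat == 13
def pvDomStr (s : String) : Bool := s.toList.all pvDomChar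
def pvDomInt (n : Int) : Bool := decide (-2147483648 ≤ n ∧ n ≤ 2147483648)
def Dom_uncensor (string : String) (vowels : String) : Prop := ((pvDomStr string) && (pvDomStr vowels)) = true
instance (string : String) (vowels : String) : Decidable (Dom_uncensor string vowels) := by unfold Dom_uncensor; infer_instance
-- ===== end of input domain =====

-- B replaces A's character-by-character scan (with a running vowel index) by splitting on '*'
-- once and interleaving the vowels between the segments (more idiomatic; same result).


-- ===== PORT A =====
-- literal port: for i in range(len(string)): if string[i]=='*' append vowels[vowels_index], idx+=1 else append string[i]
def uncensor (string : String) (vowels : String) : String :=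
  let s := string.toList
  let vs := vowels.toList
  let st := (PySem.List.pyRange 0 (s.length : Int) 1).foldl
    (fun (st : List Char × Int) i =>
      let c := PySem.List.pyGetD s i ' '
      if c = '*' then (st.1 ++ [PySem.List.pyGetD vs st.2 ' '], st.2 + 1)
      else (st.1 ++ [c], st.2)) ([], 0)
  String.ofList st.1

-- ===== PORT B =====
-- literal port of Source B: parts = string.split('*'); result = parts[0]; for i, seg in enumerate(parts[1:]): result += vowels[i] + seg
def uncensor_alt (string : String) (vowels : String) : String :=
  let parts := PySem.Chars.splitOn string.toList ['*']
  let vs := vowels.toList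
  let res := (PySem.List.enumerate (PySem.List.slice parts (some 1) none) 0).foldl
    (fun (r : List Char) p => r ++ [PySem.List.pyGetD vs p.1 ' '] ++ p.2)
    (PySem.List.pyGetD parts 0 [])
  String.ofList res

-- ===== PRECONDITION & SPEC =====
-- Pre_ excludes exactly the inputs where Python A raises IndexError: more '*' in string than vowels supplied.
def Pre_uncensor (string : String) (vowels : String) : Prop :=
  string.toList.count '*' ≤ vowels.toList.length
instance (string : String) (vowels : String) : Decidable (Pre_uncensor string vowels) := by
  unfold Pre_uncensor; infer_instance

def pvWitness_uncensor : String × String := ("h*ll* w*rld", "eoo")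

def Spec_uncensor (string : String) (vowels : String) (out : String) : Prop := out = uncensor_alt string vowels
instance (string : String) (vowels : String) (out : String) : Decidable (Spec_uncensor string vowels out) := by unfold Spec_uncensor; infer_instance

-- ===== CLAIM (what is proved, stated in full; the proofs are below) =====
def Claim_equal_uncensor : Prop := ∀ (string : String) (vowels : String), Dom_uncensor string vowels → Pre_uncensor string vowels → Spec_uncensor string vowels (uncensor string vowels)

-- ===== LEMMAS AND PROOFS =====

-- proof-only model of string.split('*') with a clean structural recursion
def splitStar : List Char → List (List Char)
  | [] => [[]]
  | c :: cs =>
    if c = '*' then [] :: splitStar cs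
    else
      match splitStar cs with
      | [] => [[c]]
      | h :: t => (c :: h) :: t

lemma splitStar_ne_nil (l : List Char) : splitStar l ≠ [] := by
  cases l with
  | nil => simp [splitStar]
  | cons c cs =>
    simp only [splitStar]
    split_ifs
    · simp
    · cases h : splitStar cs <;> simp

def mapHead (f : List Char → List Char) : List (List Char) → List (List Char)
  | [] => []
  | h :: t => f h :: t

lemma go_eq_splitStar : ∀ (fuel : Nat) (l cur : List Char) (acc : List (List Char)),
    l.length ≤ fuel →
    PySem.Chars.splitOn.go ['*'] fuel l cur acc
      = acc.reverse ++ mapHead (cur.reverse ++ ·) (splitStar l) := by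
  intro fuel
  induction fuel with
  | zero =>
    intro l cur acc h
    have : l = [] := List.eq_nil_of_length_eq_zero (Nat.le_zero.mp h)
    subst this
    simp [PySem.Chars.splitOn.go, splitStar, mapHead]
  | succ fuel ih =>
    intro l cur acc h
    cases l with
    | nil => simp [PySem.Chars.splitOn.go, splitStar, mapHead]
    | cons c rest =>
      simp only [PySem.Chars.splitOn.go]
      by_cases hc : c = '*'
      · subst hc
        have hpre : List.isPrefixOf ['*'] ('*' :: rest) = true := by simp [List.isPrefixOf]
        rw [if_pos hpre]
        have hd : List.drop (['*'] : List Char).length ('*' :: rest) = rest := rfl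
        rw [hd]
        simp only [List.length_cons] at h
        rw [ih _ _ _ (by omega)]
        have hne := splitStar_ne_nil rest
        cases hs : splitStar rest with
        | nil => exact absurd hs hne
        | cons h0 t0 =>
          simp [splitStar, hs, mapHead]
      · have hpre : List.isPrefixOf ['*'] (c :: rest) = false := by
          simp [List.isPrefixOf]; exact fun e => hc e.symm
        rw [if_neg (by simp [hpre])]
        simp only [List.length_cons] at h
        rw [ih _ _ _ (by omega)]
        have hne := splitStar_ne_nil rest
        cases hs : splitStar rest with
        | nil => exact absurd hs hne
        | cons h0 t0 =>
          simp [splitStar, hs, hc, mapHead, List.reverse_cons]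

lemma splitOn_eq_splitStar (l : List Char) :
    PySem.Chars.splitOn l ['*'] = splitStar l := by
  show PySem.Chars.splitOn.go ['*'] (l.length + 1) l [] [] = splitStar l
  rw [go_eq_splitStar (l.length + 1) l [] [] (by omega)]
  have hne := splitStar_ne_nil l
  cases hs : splitStar l with
  | nil => exact absurd hs hne
  | cons h0 t0 => simp [mapHead]

-- the A-side loop, interleaved: the char-by-char fold starting at vowel index k equals
-- B's segment interleaving of splitStar with enumerate starting at k
lemma loop_eq (vs : List Char) : ∀ (cs acc : List Char) (k : Int),
    (cs.foldl (fun (st : List Char × Int) c =>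
        if c = '*' then (st.1 ++ [PySem.List.pyGetD vs st.2 ' '], st.2 + 1)
        else (st.1 ++ [c], st.2)) (acc, k)).1
      = (PySem.List.enumerate ((splitStar cs).drop 1) k).foldl
          (fun (r : List Char) p => r ++ [PySem.List.pyGetD vs p.1 ' '] ++ p.2)
          (acc ++ (splitStar cs).headD []) := by
  intro cs
  induction cs with
  | nil => intro acc k; simp [splitStar]
  | cons c cs ih =>
    intro acc k
    by_cases hc : c = '*'
    · subst hc
      simp only [List.foldl_cons]
      rw [ih]
      have hne := splitStar_ne_nil cs
      cases hs : splitStar cs with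
      | nil => exact absurd hs hne
      | cons h0 t0 =>
        simp [splitStar, hs, PySem.List.enumerate_cons, List.append_assoc]
    · simp only [List.foldl_cons, if_neg hc]
      rw [ih]
      have hne := splitStar_ne_nil cs
      cases hs : splitStar cs with
      | nil => exact absurd hs hne
      | cons h0 t0 =>
        simp [splitStar, hs, hc, List.append_assoc]

-- ===== VERDICT (by name: the statement is the Claim_ definition above) =====
theorem uncensor_spec : Claim_equal_uncensor := by
  intro string vowels _ _
  unfold Spec_uncensor uncensor uncensor_alt
  simp only []
  rw [PySem.List.foldl_pyRange_zero_pyGetD' string.toList ' '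
        (fun (st : List Char × Int) c =>
          if c = '*' then (st.1 ++ [PySem.List.pyGetD vowels.toList st.2 ' '], st.2 + 1)
          else (st.1 ++ [c], st.2)) ([], 0)]
  rw [loop_eq vowels.toList string.toList [] 0]
  rw [splitOn_eq_splitStar]
  have hne := splitStar_ne_nil string.toList
  cases hs : splitStar string.toList with
  | nil => exact absurd hs hne
  | cons h0 t0 =>
    congr 1
    rw [PySem.List.slice_from_one]
    simp [PySem.List.pyGetD_zero]
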